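-- pv_equiv track=rewrite | github.com/JaewanHwang/algorithm-study | problems/pro_행렬과 연산/황재완.py | solution
-- ===== SOURCE A (Python) =====
-- from collections import deque
--
-- def solution(rc, operations):
--     R, C = len(rc), len(rc[0])
--     mat = rc
--     first = deque(mat[0][:])
--     last = deque(mat[-1][:])
--     left = deque(mat[r][0] for r in range(R - 2, 0, -1))
--     right = deque(mat[r][-1] for r in range(1, R - 1, 1))
--     mid = deque(deque(mat[r][1: C - 1]) for r in range(1, R - 1, 1))
--     for operation in operations:
--         if operation == 'ShiftRow':
--             right.appendleft(first.pop())
--             left.append(first.popleft())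
--             mid.appendleft(first)
--             first = last
--             last = mid.pop()
--             last.appendleft(left.popleft())
--             last.append(right.pop())
--         else:
--             right.appendleft(first.pop())
--             last.append(right.pop())
--             left.appendleft(last.popleft())
--             first.appendleft(left.pop())
--     ans = [list(first)]
--     while mid:
--         ans.append([left.pop()] + list(mid.popleft()) + [right.popleft()])
--     ans.append(list(last))
--     return ans
-- ===== SOURCE B (Python) =====
-- def solution(rc, operations):
--     # Whole-matrix view: ShiftRow rotates the list of rows; Rotate rebuilds the
--     # border from each row's neighbours by slicing.  Equivalence claimed for
--     # rectangular matrices with at least 2 rows and 2 columns.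
--     mat = rc
--     for op in operations:
--         if op == 'ShiftRow':
--             mat = mat[-1:] + mat[:-1]
--         else:
--             top, body, bot = mat[0], mat[1:-1], mat[-1]
--             below = body + [bot]
--             above = [top] + body
--             new_top = [below[0][0]] + top[:-1]
--             new_bot = bot[1:] + [above[-1][-1]]
--             new_body = [[b[0]] + r[1:-1] + [a[-1]]
--                         for r, b, a in zip(body, below[1:], above)]
--             mat = [new_top] + new_body + [new_bot]
--     return mat
-- ===== Notes on version B (the rewrite author's own statement) =====
-- stated objective: alternative
-- what changed: B keeps the whole board as one 2-D list and applies each operation by list slicing (row rotation / border rebuilt from row neighbours), instead of A's five separate deques (top, bottom, left, right, middle) shuffled corner by corner.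
-- outside the precondition, e.g. on solution([[1, 2, 3]], []): A returns [[1, 2, 3], [1, 2, 3]], B returns [[1, 2, 3]]
import Mathlib
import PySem

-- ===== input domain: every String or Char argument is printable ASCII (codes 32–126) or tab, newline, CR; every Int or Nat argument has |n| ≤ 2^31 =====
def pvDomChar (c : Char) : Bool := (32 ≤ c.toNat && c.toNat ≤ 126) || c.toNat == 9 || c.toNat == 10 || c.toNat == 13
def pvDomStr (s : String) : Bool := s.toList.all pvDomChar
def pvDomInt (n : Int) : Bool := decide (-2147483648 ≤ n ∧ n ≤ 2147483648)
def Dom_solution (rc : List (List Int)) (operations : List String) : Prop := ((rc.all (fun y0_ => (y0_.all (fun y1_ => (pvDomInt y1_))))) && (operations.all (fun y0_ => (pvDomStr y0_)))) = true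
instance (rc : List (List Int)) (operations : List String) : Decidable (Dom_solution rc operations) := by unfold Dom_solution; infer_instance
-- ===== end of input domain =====

-- B keeps the whole board as one 2-D list updated by slicing instead of A's five deques
-- (objective: alternative structure, same cost); equivalence is claimed for rectangular
-- boards with at least 2 rows and 2 columns (Pre_solution).

-- ===== PORT A =====
-- deque.pop() : none = IndexError on an empty deque
def pvPopBack? {α : Type} : List α → Option (α × List α)
  | [] => none
  | [x] => some (x, [])
  | x :: y :: xs => (pvPopBack? (y :: xs)).map (fun p => (p.1, x :: p.2))

-- deque.popleft() : none = IndexError on an empty deque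
def pvPopFront? {α : Type} : List α → Option (α × List α)
  | [] => none
  | x :: xs => some (x, xs)

-- one iteration of A's for-loop over (first, last, left, right, mid), in A's statement order
def pvStepA (first last left right : List Int) (mid : List (List Int)) (op : String) :
    Option (List Int × List Int × List Int × List Int × List (List Int)) :=
  if op = "ShiftRow" then
    match pvPopBack? first with
    | none => none
    | some (x, f1) =>
      match pvPopFront? f1 with
      | none => none
      | some (y, f2) =>
        let right1 := x :: right
        let left1 := left ++ [y]
        let mid1 := f2 :: mid
        match pvPopBack? mid1 with
        | none => none
        | some (l2, mid2) =>
          match pvPopFront? left1 with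
          | none => none
          | some (z, left2) =>
            match pvPopBack? right1 with
            | none => none
            | some (w, right2) => some (last, (z :: l2) ++ [w], left2, right2, mid2)
  else
    match pvPopBack? first with
    | none => none
    | some (x, f1) =>
      let right1 := x :: right
      match pvPopBack? right1 with
      | none => none
      | some (w, right2) =>
        let last1 := last ++ [w]
        match pvPopFront? last1 with
        | none => none
        | some (z, last2) =>
          let left1 := z :: left
          match pvPopBack? left1 with
          | none => none
          | some (u, left2) => some (u :: f1, last2, left2, right2, mid)

-- the initial five deques (none = IndexError from mat[0] on an empty rc); the inner
-- pyGetD defaults are exact whenever the indices are in range, which Pre_solution guarantees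
def pvInitA (rc : List (List Int)) :
    Option (List Int × List Int × List Int × List Int × List (List Int)) :=
  match PySem.List.pyGet? rc 0 with
  | none => none
  | some row0 =>
    let R : Int := PySem.List.len rc
    let C : Int := PySem.List.len row0
    let first := row0
    let last := PySem.List.pyGetD rc (-1) []
    let left := (PySem.List.pyRange (R - 2) 0 (-1)).map (fun r => PySem.List.pyGetD (PySem.List.pyGetD rc r []) 0 0)
    let right := (PySem.List.pyRange 1 (R - 1) 1).map (fun r => PySem.List.pyGetD (PySem.List.pyGetD rc r []) (-1) 0)
    let mid := (PySem.List.pyRange 1 (R - 1) 1).map (fun r => PySem.List.slice (PySem.List.pyGetD rc r []) (some 1) (some (C - 1)))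
    some (first, last, left, right, mid)

-- A's final while-loop; the getLastD/headD defaults are exact when left and right are as
-- long as mid (always the case under Pre_solution; otherwise Python's deque.pop raises)
def pvRebuildA : List Int → List Int → List (List Int) → List (List Int)
  | _, _, [] => []
  | lt, rt, mrow :: mid => (lt.getLastD 0 :: (mrow ++ [rt.headD 0])) :: pvRebuildA lt.dropLast rt.tail mid

def solution (rc : List (List Int)) (operations : List String) : List (List Int) :=
  match operations.foldl (fun s? op => s?.bind (fun s => pvStepA s.1 s.2.1 s.2.2.1 s.2.2.2.1 s.2.2.2.2 op)) (pvInitA rc) with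
  | none => []   -- Python raised; excluded by Pre_solution
  | some (f, l, lt, rt, m) => f :: pvRebuildA lt rt m ++ [l]

-- ===== PORT B =====
-- mat[-1:] + mat[:-1]
def pvShiftB (mat : List (List Int)) : List (List Int) :=
  PySem.List.slice mat (some (-1)) none ++ PySem.List.slice mat none (some (-1))

-- the Rotate branch of Source B; pyGetD defaults are exact for a non-empty mat with
-- non-empty rows (Pre_solution), where Python's mat[0]/mat[-1]/row[0]/row[-1] return
def pvRotateB (mat : List (List Int)) : List (List Int) :=
  let top := PySem.List.pyGetD mat 0 []
  let body := PySem.List.slice mat (some 1) (some (-1))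
  let bot := PySem.List.pyGetD mat (-1) []
  let below := body ++ [bot]
  let above := top :: body
  let newTop := PySem.List.pyGetD (PySem.List.pyGetD below 0 []) 0 0 :: PySem.List.slice top none (some (-1))
  let newBot := PySem.List.slice bot (some 1) none ++ [PySem.List.pyGetD (PySem.List.pyGetD above (-1) []) (-1) 0]
  let newBody := (body.zip ((PySem.List.slice below (some 1) none).zip above)).map
      (fun p => PySem.List.pyGetD p.2.1 0 0 :: (PySem.List.slice p.1 (some 1) (some (-1)) ++ [PySem.List.pyGetD p.2.2 (-1) 0]))
  newTop :: newBody ++ [newBot]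

def solution_alt (rc : List (List Int)) (operations : List String) : List (List Int) :=
  operations.foldl (fun mat op => if op = "ShiftRow" then pvShiftB mat else pvRotateB mat) rc

-- ===== PRECONDITION & SPEC =====
-- Pre_ excludes boards on which A raises (deque pops on an emptied deque, mat[0] on []) or
-- returns an accidental value of its five-deque decomposition: middle rows cut to row 0's
-- length on ragged boards, and a single row read as both 'first' and 'last' when rc has one
-- row and no Rotate ever runs.
def Pre_solution (rc : List (List Int)) (operations : List String) : Prop :=
  (2 ≤ rc.length ∧ 1 ≤ (rc.headD []).length ∧ 1 ≤ (rc.getLastD []).length ∧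
    (∀ row ∈ rc.tail.dropLast, row.length = (rc.headD []).length) ∧
    (2 ≤ (rc.headD []).length ∨ rc.length = 2) ∧
    ((∀ op ∈ operations, ¬ op = "ShiftRow") ∨
      (2 ≤ (rc.headD []).length ∧ 2 ≤ (rc.getLastD []).length)))
  ∨ (rc.length = 1 ∧ 2 ≤ (rc.headD []).length ∧ ∃ op ∈ operations, ¬ op = "ShiftRow")
instance (rc : List (List Int)) (operations : List String) : Decidable (Pre_solution rc operations) := by unfold Pre_solution; infer_instance

def pvWitness_solution : List (List Int) × List String := ([[1, 2], [3, 4], [5, 6]], ["ShiftRow", "Rotate"])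

def Spec_solution (rc : List (List Int)) (operations : List String) (out : List (List Int)) : Prop := out = solution_alt rc operations
instance (rc : List (List Int)) (operations : List String) (out : List (List Int)) : Decidable (Spec_solution rc operations out) := by unfold Spec_solution; infer_instance

-- ===== CLAIM (what is proved, stated in full; the proofs are below) =====
def Claim_equal_solution : Prop := ∀ (rc : List (List Int)) (operations : List String), Dom_solution rc operations → Pre_solution rc operations → Spec_solution rc operations (solution rc operations)

-- ===== LEMMAS AND PROOFS =====

-- deque.pop characterised
theorem pvPopBack?_eq {α : Type} (xs : List α) (h : xs ≠ []) :
    pvPopBack? xs = some (xs.getLast h, xs.dropLast) := by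
  induction xs with
  | nil => simp at h
  | cons x xs ih =>
    cases xs with
    | nil => simp [pvPopBack?]
    | cons y ys =>
      simp only [pvPopBack?, ih (by simp)]
      simp [List.getLast_cons, List.dropLast_cons_of_ne_nil]

theorem pvPopBack?_eqD {α : Type} (d : α) (xs : List α) (h : xs ≠ []) :
    pvPopBack? xs = some (xs.getLastD d, xs.dropLast) := by
  rw [pvPopBack?_eq xs h]
  simp [List.getLastD_eq_getLast?, List.getLast?_eq_getLast (l := xs) (h := h)]

theorem pvPopFront?_eqD {α : Type} (d : α) (xs : List α) (h : xs ≠ []) :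
    pvPopFront? xs = some (xs.headD d, xs.tail) := by
  cases xs with
  | nil => exact absurd rfl h
  | cons a t => rfl

-- getD toolkit
theorem pvExt {α : Type} (d : α) (L R : List α) (hlen : L.length = R.length)
    (h : ∀ j, j < L.length → L.getD j d = R.getD j d) : L = R := by
  apply List.ext_getElem hlen
  intro i h1 h2
  have := h i h1
  rwa [List.getD_eq_getElem L d h1, List.getD_eq_getElem R d h2] at this

theorem pvGetD_tail {α : Type} (l : List α) (j : Nat) (d : α) :
    l.tail.getD j d = l.getD (j + 1) d := by
  cases l <;> rfl

theorem pvGetD_cons_succ {α : Type} (a : α) (l : List α) (j : Nat) (d : α) :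
    (a :: l).getD (j + 1) d = l.getD j d := by
  rw [← pvGetD_tail, List.tail_cons]

theorem pvGetD_map {α β : Type} (g : α → β) (l : List α) (j : Nat) (d : β) (d' : α)
    (h : j < l.length) : (l.map g).getD j d = g (l.getD j d') := by
  rw [List.getD_eq_getElem _ _ (by simpa using h), List.getD_eq_getElem _ _ h, List.getElem_map]

theorem pvGetD_zip {α β : Type} (l : List α) (r : List β) (j : Nat) (d1 : α) (d2 : β)
    (h1 : j < l.length) (h2 : j < r.length) :
    (l.zip r).getD j (d1, d2) = (l.getD j d1, r.getD j d2) := by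
  rw [List.getD_eq_getElem _ _ (by simp; omega), List.getD_eq_getElem _ _ h1,
    List.getD_eq_getElem _ _ h2, List.getElem_zip]

theorem pvGetD_dropLast {α : Type} (l : List α) (j : Nat) (d : α) (h : j < l.length - 1) :
    l.dropLast.getD j d = l.getD j d := by
  rw [List.getD_eq_getElem _ _ (by simp; omega), List.getD_eq_getElem _ _ (by omega),
    List.getElem_dropLast]

theorem pvGetD_reverse {α : Type} (l : List α) (j : Nat) (d : α) (h : j < l.length) :
    l.reverse.getD j d = l.getD (l.length - 1 - j) d := by
  rw [List.getD_eq_getElem _ _ (by simpa using h), List.getD_eq_getElem _ _ (by omega),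
    List.getElem_reverse]

theorem pvGetLastD_eq_getD {α : Type} (l : List α) (d : α) (h : l ≠ []) :
    l.getLastD d = l.getD (l.length - 1) d := by
  have hl : 0 < l.length := List.length_pos_of_ne_nil h
  rw [List.getD_eq_getElem _ _ (by omega)]
  simp [List.getLastD_eq_getLast?, List.getLast?_eq_getLast (l := l) (h := h),
    List.getLast_eq_getElem]

theorem pvHeadD_eq_getD {α : Type} (l : List α) (d : α) : l.headD d = l.getD 0 d := by
  cases l <;> rfl

-- PySem access wrappers (elaborated with this file's numerals, so that `rw` matches)
theorem pvPyGetD_zero {α : Type} (xs : List α) (d : α) :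
    PySem.List.pyGetD xs 0 d = xs.getD 0 d := PySem.List.pyGetD_zero xs d

theorem pvPyGetD_neg_one {α : Type} (xs : List α) (d : α) (h : xs ≠ []) :
    PySem.List.pyGetD xs (-1) d = xs.getD (xs.length - 1) d := by
  have hl : 0 < xs.length := List.length_pos_of_ne_nil h
  have h1 : PySem.List.pyGetD xs (-1) d = xs.getLast h := PySem.List.pyGetD_neg_one xs d h
  rw [h1, List.getD_eq_getElem _ _ (by omega), List.getLast_eq_getElem]

theorem pvPyGetD_end (f : List Int) (rows : List (List Int)) (l : List Int) :
    PySem.List.pyGetD (f :: rows ++ [l]) (-1) [] = l :=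
  PySem.List.pyGetD_neg_one_append_singleton _ _ _

theorem pvPyGetD_head (f : List Int) (rows : List (List Int)) (l : List Int) :
    PySem.List.pyGetD (f :: rows ++ [l]) 0 [] = f := by
  rw [pvPyGetD_zero, List.getD_append _ _ _ _ (by simp)]
  rfl

theorem pvSlice_one_neg_one {α : Type} (x : α) (ys : List α) (z : α) :
    PySem.List.slice (x :: ys ++ [z]) (some 1) (some (-1)) = ys := by
  unfold PySem.List.slice
  norm_num [PySem.List.clampIdx_neg_one, PySem.List.clampIdx_natCast]

-- the abstraction: rows 1..R-2 of the board encoded by (left, mid, right)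
def pvGlue (a : Int) (mj : List Int) (b : Int) : List Int := a :: mj ++ [b]

theorem pvPyGetD_glue_last (a : Int) (mj : List Int) (b d : Int) :
    PySem.List.pyGetD (pvGlue a mj b) (-1) d = b := by
  show PySem.List.pyGetD ((a :: mj) ++ [b]) (-1) d = b
  exact PySem.List.pyGetD_neg_one_append_singleton _ _ _

theorem pvPyGetD_glue_head (a : Int) (mj : List Int) (b d : Int) :
    PySem.List.pyGetD (pvGlue a mj b) 0 d = a := by
  rw [pvPyGetD_zero]; rfl

theorem pvGlue_getD_zero (a : Int) (mj : List Int) (b d : Int) :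
    (pvGlue a mj b).getD 0 d = a := rfl

theorem pvGetD_zero_cons {α : Type} (a : α) (l : List α) (d : α) : (a :: l).getD 0 d = a := rfl

def pvRows (lt : List Int) (m : List (List Int)) (rt : List Int) : List (List Int) :=
  (lt.reverse.zip (m.zip rt)).map (fun p => pvGlue p.1 p.2.1 p.2.2)

theorem pvRows_length (lt : List Int) (m : List (List Int)) (rt : List Int)
    (h1 : lt.length = m.length) (h2 : rt.length = m.length) :
    (pvRows lt m rt).length = m.length := by
  simp [pvRows, h1, h2]

theorem pvRows_getD (lt : List Int) (m : List (List Int)) (rt : List Int)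
    (h1 : lt.length = m.length) (h2 : rt.length = m.length) (j : Nat) (hj : j < m.length) :
    (pvRows lt m rt).getD j [] = pvGlue (lt.getD (m.length - 1 - j) 0) (m.getD j []) (rt.getD j 0) := by
  unfold pvRows
  rw [pvGetD_map _ _ _ _ ((0 : Int), (([] : List Int), (0 : Int)))
      (by simp [h1, h2]; omega),
    pvGetD_zip _ _ _ _ _ (by simp [h1]; omega) (by simp [h2]; omega),
    pvGetD_zip _ _ _ _ _ hj (by omega),
    pvGetD_reverse _ _ _ (by omega), h1]

theorem pvRebuildA_eq (m : List (List Int)) : ∀ (lt rt : List Int),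
    lt.length = m.length → rt.length = m.length → pvRebuildA lt rt m = pvRows lt m rt := by
  induction m with
  | nil => intro lt rt h1 h2; simp [pvRebuildA, pvRows]
  | cons m0 m' ih =>
    intro lt rt h1 h2
    have hlt : lt ≠ [] := by intro h; subst h; simp at h1
    obtain ⟨r0, rt', rfl⟩ : ∃ r0 rt', rt = r0 :: rt' := by
      cases rt with
      | nil => simp at h2
      | cons a b => exact ⟨a, b, rfl⟩
    have hrev : lt.reverse = lt.getLastD 0 :: lt.dropLast.reverse := by
      conv_lhs => rw [← List.dropLast_concat_getLast hlt]
      rw [List.reverse_append]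
      simp [List.getLastD_eq_getLast?, List.getLast?_eq_getLast (l := lt) (h := hlt)]
    simp only [pvRebuildA, pvRows, hrev, List.zip_cons_cons, List.map_cons]
    apply congrArg₂ List.cons
    · simp [pvGlue]
    · have := ih lt.dropLast rt' (by simp only [List.length_dropLast]; simp only [List.length_cons] at h1; omega) (by simpa using h2)
      simpa [pvRebuildA, pvRows] using this

-- evaluated step, Rotate branch
theorem pvStepA_rot (f l lt rt : List Int) (m : List (List Int)) (op : String)
    (hop : ¬ op = "ShiftRow") (hf : f ≠ []) (hl : l ≠ []) :
    pvStepA f l lt rt m op =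
      some ((l.headD 0 :: lt).getLastD 0 :: f.dropLast,
            l.tail ++ [(f.getLastD 0 :: rt).getLastD 0],
            (l.headD 0 :: lt).dropLast,
            (f.getLastD 0 :: rt).dropLast, m) := by
  obtain ⟨a, l', rfl⟩ : ∃ a l', l = a :: l' := by
    cases l with
    | nil => exact absurd rfl hl
    | cons a b => exact ⟨a, b, rfl⟩
  simp only [pvStepA, if_neg hop, pvPopBack?_eqD 0 f hf,
    pvPopBack?_eqD 0 (f.getLastD 0 :: rt) (by simp), List.cons_append,
    pvPopFront?_eqD 0 (a :: (l' ++ [(f.getLastD 0 :: rt).getLastD 0])) (by simp),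
    List.headD_cons, List.tail_cons,
    pvPopBack?_eqD 0 (a :: lt) (by simp)]

-- evaluated step, ShiftRow branch
theorem pvStepA_shift (f l lt rt : List Int) (m : List (List Int))
    (hf : 2 ≤ f.length) :
    pvStepA f l lt rt m "ShiftRow" =
      some (l,
            (lt ++ [f.dropLast.headD 0]).headD 0 ::
              ((f.dropLast.tail :: m).getLastD [] ++ [(f.getLastD 0 :: rt).getLastD 0]),
            (lt ++ [f.dropLast.headD 0]).tail,
            (f.getLastD 0 :: rt).dropLast,
            (f.dropLast.tail :: m).dropLast) := by
  have hfne : f ≠ [] := by intro h; subst h; simp at hf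
  have hdne : f.dropLast ≠ [] := by
    intro h
    have h2 : f.dropLast.length = f.length - 1 := List.length_dropLast
    rw [h] at h2
    simp at h2
    omega
  simp only [pvStepA, pvPopBack?_eqD 0 f hfne,
    pvPopFront?_eqD 0 f.dropLast hdne,
    pvPopBack?_eqD ([] : List Int) (f.dropLast.tail :: m) (by simp),
    pvPopFront?_eqD 0 (lt ++ [f.dropLast.headD 0]) (by simp),
    pvPopBack?_eqD 0 (f.getLastD 0 :: rt) (by simp)]
  simp

-- B's ShiftRow on a decomposed board
theorem pvShiftB_abs (f : List Int) (rows : List (List Int)) (l : List Int) :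
    pvShiftB (f :: rows ++ [l]) = l :: (f :: rows) := by
  unfold pvShiftB
  rw [PySem.List.slice_from_neg_one, PySem.List.slice_to_neg_one]
  have h1 : (f :: rows ++ [l]).length - 1 = (f :: rows).length := by simp
  rw [h1]
  rw [List.drop_left, List.dropLast_concat]
  rfl

-- recombining head, middle and last of a row
theorem pvGlue_eta (f : List Int) (hf : 2 ≤ f.length) (hfne : f ≠ []) :
    f.dropLast.headD 0 :: (f.dropLast.tail ++ [f.getLastD 0]) = f := by
  have hdne : f.dropLast ≠ [] := by
    intro h
    have h2 : f.dropLast.length = f.length - 1 := List.length_dropLast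
    rw [h] at h2
    simp at h2
    omega
  obtain ⟨c, r, hcr⟩ : ∃ c r, f.dropLast = c :: r := by
    cases hd : f.dropLast with
    | nil => exact absurd hd hdne
    | cons a b => exact ⟨a, b, rfl⟩
  have hlast : f.getLastD 0 = f.getLast hfne := by
    simp [List.getLastD_eq_getLast?, List.getLast?_eq_getLast (l := f) (h := hfne)]
  rw [hcr, hlast]
  show (c :: r) ++ [f.getLast hfne] = f
  rw [← hcr, List.dropLast_concat_getLast hfne]

-- A's ShiftRow result abstracts to the row-rotated board
theorem pvShift_abs (f lt rt : List Int) (m : List (List Int))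
    (hf2 : 2 ≤ f.length) (hlt : lt.length = m.length) (hrt : rt.length = m.length) :
    pvRows ((lt ++ [f.dropLast.headD 0]).tail) ((f.dropLast.tail :: m).dropLast)
        ((f.getLastD 0 :: rt).dropLast)
      ++ [(lt ++ [f.dropLast.headD 0]).headD 0 ::
            ((f.dropLast.tail :: m).getLastD [] ++ [(f.getLastD 0 :: rt).getLastD 0])]
    = f :: pvRows lt m rt := by
  have hfne : f ≠ [] := by intro h; rw [h] at hf2; simp at hf2
  have hfrow := pvGlue_eta f hf2 hfne
  have hltt : (lt ++ [f.dropLast.headD 0]).tail.length = m.length := by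
    simp [List.length_tail, hlt]
  have hmt : (f.dropLast.tail :: m).dropLast.length = m.length := by simp
  have hrtt : (f.getLastD 0 :: rt).dropLast.length = m.length := by simp [hrt]
  have hRlen : (pvRows ((lt ++ [f.dropLast.headD 0]).tail) ((f.dropLast.tail :: m).dropLast)
      ((f.getLastD 0 :: rt).dropLast)).length = m.length := by
    rw [pvRows_length _ _ _ (by rw [hltt, hmt]) (by rw [hrtt, hmt]), hmt]
  apply pvExt ([] : List Int)
  · rw [List.length_append, hRlen]
    simp [pvRows_length _ _ _ hlt hrt]
  · intro j hj
    rw [List.length_append, hRlen] at hj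
    simp only [List.length_cons, List.length_nil] at hj
    rcases Nat.lt_or_ge j m.length with hjn | hjn
    · -- j < n : a middle row of the new board
      rw [List.getD_append _ _ _ _ (by rw [hRlen]; omega)]
      rw [pvRows_getD _ _ _ (by rw [hltt, hmt]) (by rw [hrtt, hmt]) _ (by rw [hmt]; omega), hmt]
      rcases Nat.eq_zero_or_pos j with rfl | hjpos
      · -- the first new middle row is f itself
        have hle : (lt ++ [f.dropLast.headD 0]).tail.getD (m.length - 1 - 0) 0 = f.dropLast.headD 0 := by
          have hltne : lt ≠ [] := by intro h; rw [h] at hlt; simp at hlt; omega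
          obtain ⟨c, lt', rfl⟩ : ∃ c lt', lt = c :: lt' := by
            cases lt with
            | nil => exact absurd rfl hltne
            | cons a b => exact ⟨a, b, rfl⟩
          simp only [List.cons_append, List.tail_cons]
          simp only [List.length_cons] at hlt
          rw [List.getD_append_right _ _ _ _ (by omega)]
          have h3 : m.length - 1 - 0 - lt'.length = 0 := by omega
          rw [h3]
          rfl
        have hme : (f.dropLast.tail :: m).dropLast.getD 0 [] = f.dropLast.tail := by
          rw [pvGetD_dropLast _ _ _ (by simp; omega)]; rfl
        have hre : (f.getLastD 0 :: rt).dropLast.getD 0 0 = f.getLastD 0 := by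
          rw [pvGetD_dropLast _ _ _ (by simp [hrt]; omega)]; rfl
        rw [hle, hme, hre]
        rw [show (f :: pvRows lt m rt).getD 0 [] = f from rfl]
        simpa [pvGlue] using hfrow
      · -- row j (1 ≤ j < n) equals the old row j-1
        obtain ⟨i, rfl⟩ : ∃ i, j = i + 1 := ⟨j - 1, by omega⟩
        rw [pvGetD_cons_succ, pvRows_getD _ _ _ hlt hrt _ (by omega)]
        have hle : (lt ++ [f.dropLast.headD 0]).tail.getD (m.length - 1 - (i + 1)) 0
            = lt.getD (m.length - 1 - i) 0 := by
          have hltne : lt ≠ [] := by intro h; rw [h] at hlt; simp at hlt; omega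
          obtain ⟨c, lt', rfl⟩ : ∃ c lt', lt = c :: lt' := by
            cases lt with
            | nil => exact absurd rfl hltne
            | cons a b => exact ⟨a, b, rfl⟩
          simp only [List.cons_append, List.tail_cons]
          simp only [List.length_cons] at hlt
          rw [List.getD_append _ _ _ _ (by omega)]
          have heq : m.length - 1 - i = (m.length - 1 - (i + 1)) + 1 := by omega
          rw [heq, pvGetD_cons_succ]
        have hme : (f.dropLast.tail :: m).dropLast.getD (i + 1) [] = m.getD i [] := by
          rw [pvGetD_dropLast _ _ _ (by simp; omega), pvGetD_cons_succ]
        have hre : (f.getLastD 0 :: rt).dropLast.getD (i + 1) 0 = rt.getD i 0 := by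
          rw [pvGetD_dropLast _ _ _ (by simp [hrt]; omega), pvGetD_cons_succ]
        rw [hle, hme, hre]
    · -- j = n : the appended last row equals the old row n-1 (or f when n = 0)
      have hjn' : j = m.length := by omega
      subst hjn'
      rw [List.getD_append_right _ _ _ _ (by rw [hRlen])]
      rw [hRlen, Nat.sub_self]
      rw [show ([(lt ++ [f.dropLast.headD 0]).headD 0 ::
            ((f.dropLast.tail :: m).getLastD [] ++ [(f.getLastD 0 :: rt).getLastD 0])] :
            List (List Int)).getD 0 [] = (lt ++ [f.dropLast.headD 0]).headD 0 ::
            ((f.dropLast.tail :: m).getLastD [] ++ [(f.getLastD 0 :: rt).getLastD 0]) from rfl]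
      rcases Nat.eq_zero_or_pos m.length with h0 | h0
      · have hlt0 : lt = [] := by rw [← List.length_eq_zero_iff]; omega
        have hrt0 : rt = [] := by rw [← List.length_eq_zero_iff]; omega
        have hm0 : m = [] := by rw [← List.length_eq_zero_iff]; omega
        subst hlt0; subst hrt0; subst hm0
        simp only [List.length_nil]
        rw [show (f :: pvRows [] [] []).getD 0 [] = f from rfl]
        simpa using hfrow
      · have hltne : lt ≠ [] := by intro h; rw [h] at hlt; simp at hlt; omega
        have hz : (lt ++ [f.dropLast.headD 0]).headD 0 = lt.getD 0 0 := by
          obtain ⟨c, lt', rfl⟩ : ∃ c lt', lt = c :: lt' := by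
            cases lt with
            | nil => exact absurd rfl hltne
            | cons a b => exact ⟨a, b, rfl⟩
          simp [pvHeadD_eq_getD]
        have hl2 : (f.dropLast.tail :: m).getLastD [] = m.getD (m.length - 1) [] := by
          rw [pvGetLastD_eq_getD _ _ (by simp)]
          have heq : (f.dropLast.tail :: m).length - 1 = (m.length - 1) + 1 := by simp; omega
          rw [heq, pvGetD_cons_succ]
        have hw : (f.getLastD 0 :: rt).getLastD 0 = rt.getD (m.length - 1) 0 := by
          rw [pvGetLastD_eq_getD _ _ (by simp)]
          have heq : (f.getLastD 0 :: rt).length - 1 = (m.length - 1) + 1 := by simp [hrt]; omega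
          rw [heq, pvGetD_cons_succ]
        obtain ⟨i, hi⟩ : ∃ i, m.length = i + 1 := ⟨m.length - 1, by omega⟩
        rw [hi, pvGetD_cons_succ, pvRows_getD _ _ _ hlt hrt _ (by omega)]
        rw [hz, hl2, hw, hi]
        simp [pvGlue]

-- A's Rotate result abstracts to the border-rotated board
theorem pvRot_abs (f l lt rt : List Int) (m : List (List Int))
    (hfne : f ≠ []) (hlne : l ≠ []) (hlt : lt.length = m.length) (hrt : rt.length = m.length) :
    ((l.headD 0 :: lt).getLastD 0 :: f.dropLast)
      :: pvRows ((l.headD 0 :: lt).dropLast) m ((f.getLastD 0 :: rt).dropLast)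
      ++ [l.tail ++ [(f.getLastD 0 :: rt).getLastD 0]]
    = pvRotateB (f :: pvRows lt m rt ++ [l]) := by
  have hrl : (pvRows lt m rt).length = m.length := pvRows_length _ _ _ hlt hrt
  have hltt : (l.headD 0 :: lt).dropLast.length = m.length := by simp [hlt]
  have hrtt : (f.getLastD 0 :: rt).dropLast.length = m.length := by simp [hrt]
  have hRlen : (pvRows ((l.headD 0 :: lt).dropLast) m ((f.getLastD 0 :: rt).dropLast)).length = m.length :=
    pvRows_length _ _ _ hltt hrtt
  simp only [pvRotateB]
  rw [pvPyGetD_head, pvSlice_one_neg_one, pvPyGetD_end,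
    PySem.List.slice_from_one, PySem.List.slice_to_neg_one]
  rw [pvPyGetD_neg_one (f :: pvRows lt m rt) [] (by simp)]
  have hbodylen : ((pvRows lt m rt).zip
      (((pvRows lt m rt ++ [l]).tail).zip (f :: pvRows lt m rt))).length = m.length := by
    simp [List.length_zip, List.length_tail, hrl]
  have hL1 : (((l.headD 0 :: lt).getLastD 0 :: f.dropLast)
      :: pvRows ((l.headD 0 :: lt).dropLast) m ((f.getLastD 0 :: rt).dropLast)).length = m.length + 1 := by
    simp only [List.length_cons, hRlen]
  apply pvExt ([] : List Int)
  · simp only [List.length_cons, List.length_append, hRlen, List.length_map, List.length_zip,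
      List.length_tail, hrl, List.length_nil]
    omega
  · intro j hj
    simp only [List.length_append, List.length_cons, List.length_nil, hRlen] at hj
    rcases Nat.eq_zero_or_pos j with rfl | hjpos
    · -- top row
      rw [List.getD_append _ _ _ _ (by rw [hL1]; omega),
        List.getD_append _ _ _ _ (by simp only [List.length_cons, List.length_map, hbodylen]; omega),
        pvGetD_zero_cons, pvGetD_zero_cons]
      congr 1
      rcases Nat.eq_zero_or_pos m.length with h0 | h0
      · have hlt0 : lt = [] := by rw [← List.length_eq_zero_iff]; omega
        have hm0 : m = [] := by rw [← List.length_eq_zero_iff]; omega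
        subst hlt0; subst hm0
        rw [show pvRows [] [] rt = [] from rfl,
          show (([] : List (List Int)) ++ [l]) = [l] from rfl,
          show PySem.List.pyGetD ([l] : List (List Int)) 0 [] = l from by rw [pvPyGetD_zero]; rfl,
          pvPyGetD_zero,
          show ((l.headD 0 :: ([] : List Int))).getLastD 0 = l.headD 0 from rfl,
          pvHeadD_eq_getD]
      · rw [pvPyGetD_zero, pvPyGetD_zero, List.getD_append _ _ _ _ (by omega),
          pvRows_getD _ _ _ hlt hrt _ (by omega), pvGlue_getD_zero,
          pvGetLastD_eq_getD _ _ (by simp)]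
        have heq : (l.headD 0 :: lt).length - 1 = (m.length - 1 - 0) + 1 := by simp [hlt]; omega
        rw [heq, pvGetD_cons_succ]
    · rcases Nat.lt_or_ge j (m.length + 1) with hjm | hjm
      · -- middle rows
        obtain ⟨i, rfl⟩ : ∃ i, j = i + 1 := ⟨j - 1, by omega⟩
        have hi : i < m.length := by omega
        rw [List.getD_append _ _ _ _ (by rw [hL1]; omega),
          List.getD_append _ _ _ _ (by simp only [List.length_cons, List.length_map, hbodylen]; omega),
          pvGetD_cons_succ, pvGetD_cons_succ,
          pvRows_getD _ _ _ hltt hrtt _ hi]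
        rw [pvGetD_map _ _ _ _ (([] : List Int), (([] : List Int), ([] : List Int)))
            (by rw [hbodylen]; omega),
          pvGetD_zip _ _ _ _ _ (by rw [hrl]; omega)
            (by simp [List.length_zip, List.length_tail, hrl]; omega),
          pvGetD_zip _ _ _ _ _ (by simp [List.length_tail, hrl]; omega) (by simp [hrl]; omega)]
        -- left entry
        have hleft : (l.headD 0 :: lt).dropLast.getD (m.length - 1 - i) 0
            = PySem.List.pyGetD ((pvRows lt m rt ++ [l]).tail.getD i []) 0 0 := by
          rw [pvGetD_tail]
          rw [pvGetD_dropLast _ _ _ (by simp [hlt]; omega)]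
          rcases Nat.lt_or_ge (i + 1) m.length with hlt2 | hlt2
          · rw [List.getD_append _ _ _ _ (by omega), pvRows_getD _ _ _ hlt hrt _ hlt2,
              pvPyGetD_glue_head]
            have heq : m.length - 1 - i = (m.length - 1 - (i + 1)) + 1 := by omega
            rw [heq, pvGetD_cons_succ]
          · have hieq : i + 1 = m.length := by omega
            rw [List.getD_append_right _ _ _ _ (by omega), hrl, hieq, Nat.sub_self,
              pvGetD_zero_cons, pvPyGetD_zero]
            have heq : m.length - 1 - i = 0 := by omega
            rw [heq, pvGetD_zero_cons, pvHeadD_eq_getD]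
        -- right entry
        have hright : (f.getLastD 0 :: rt).dropLast.getD i 0
            = PySem.List.pyGetD ((f :: pvRows lt m rt).getD i []) (-1) 0 := by
          rw [pvGetD_dropLast _ _ _ (by simp [hrt]; omega)]
          rcases Nat.eq_zero_or_pos i with rfl | hipos
          · rw [pvGetD_zero_cons, pvGetD_zero_cons,
              pvPyGetD_neg_one _ _ hfne, pvGetLastD_eq_getD _ _ hfne]
          · obtain ⟨i', rfl⟩ : ∃ i', i = i' + 1 := ⟨i - 1, by omega⟩
            rw [pvGetD_cons_succ, pvGetD_cons_succ,
              pvRows_getD _ _ _ hlt hrt _ (by omega),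
              pvPyGetD_glue_last]
        -- middle entry
        have hmid : PySem.List.slice ((pvRows lt m rt).getD i []) (some 1) (some (-1))
            = m.getD i [] := by
          rw [pvRows_getD _ _ _ hlt hrt _ hi]
          rw [show pvGlue (lt.getD (m.length - 1 - i) 0) (m.getD i []) (rt.getD i 0)
              = lt.getD (m.length - 1 - i) 0 :: (m.getD i []) ++ [rt.getD i 0] from rfl]
          rw [pvSlice_one_neg_one]
        rw [hleft, hright, ← hmid]
        rfl
      · -- bottom row
        have hje : j = m.length + 1 := by omega
        subst hje
        rw [List.getD_append_right _ _ _ _ (by rw [hL1]),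
          List.getD_append_right _ _ _ _ (by simp only [List.length_cons, List.length_map, hbodylen]; omega)]
        rw [hL1, Nat.sub_self, pvGetD_zero_cons]
        rw [show ((PySem.List.pyGetD (PySem.List.pyGetD (pvRows lt m rt ++ [l]) 0 []) 0 0 :: f.dropLast)
              :: ((pvRows lt m rt).zip (((pvRows lt m rt ++ [l]).tail).zip (f :: pvRows lt m rt))).map
                (fun p => PySem.List.pyGetD p.2.1 0 0 ::
                  (PySem.List.slice p.1 (some 1) (some (-1)) ++ [PySem.List.pyGetD p.2.2 (-1) 0]))).length
            = m.length + 1 from by simp [hbodylen]]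
        rw [Nat.sub_self, pvGetD_zero_cons, PySem.List.slice_from_one]
        congr 2
        have hflen : (f :: pvRows lt m rt).length - 1 = m.length := by simp [hrl]
        rw [hflen]
        rcases Nat.eq_zero_or_pos m.length with h0 | h0
        · have hlt0 : lt = [] := by rw [← List.length_eq_zero_iff]; omega
          have hrt0 : rt = [] := by rw [← List.length_eq_zero_iff]; omega
          have hm0 : m = [] := by rw [← List.length_eq_zero_iff]; omega
          subst hlt0; subst hrt0; subst hm0
          simp only [List.length_nil]
          rw [show (f :: pvRows [] [] []).getD 0 [] = f from rfl,
            pvPyGetD_neg_one _ _ hfne,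
            show ((f.getLastD 0 :: ([] : List Int))).getLastD 0 = f.getLastD 0 from rfl,
            pvGetLastD_eq_getD _ _ hfne]
        · have heqI : m.length = (m.length - 1) + 1 := by omega
          rw [pvGetLastD_eq_getD _ _ (by simp)]
          have heq2 : (f.getLastD 0 :: rt).length - 1 = (m.length - 1) + 1 := by simp [hrt]; omega
          rw [heq2, pvGetD_cons_succ]
          conv_rhs => rw [heqI]
          rw [pvGetD_cons_succ, pvRows_getD _ _ _ hlt hrt _ (by omega), pvPyGetD_glue_last]

-- the loop: A's deque state tracks B's board
theorem pvLoopA (ops : List String) :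
    ∀ (f l lt rt : List Int) (m : List (List Int)),
      ((2 ≤ f.length ∧ 2 ≤ l.length) ∨ ((∀ op ∈ ops, ¬ op = "ShiftRow") ∧ f ≠ [] ∧ l ≠ [])) →
      lt.length = m.length → rt.length = m.length →
      ∃ f' l' lt' rt' m',
        ops.foldl (fun s? op => s?.bind (fun s => pvStepA s.1 s.2.1 s.2.2.1 s.2.2.2.1 s.2.2.2.2 op)) (some (f, l, lt, rt, m)) = some (f', l', lt', rt', m') ∧
        lt'.length = m'.length ∧ rt'.length = m'.length ∧
        f' :: pvRows lt' m' rt' ++ [l'] =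
          ops.foldl (fun mat op => if op = "ShiftRow" then pvShiftB mat else pvRotateB mat) (f :: pvRows lt m rt ++ [l]) := by
  induction ops with
  | nil =>
    intro f l lt rt m _hfl hlt hrt
    exact ⟨f, l, lt, rt, m, rfl, hlt, hrt, rfl⟩
  | cons op ops ih =>
    intro f l lt rt m hfl hlt hrt
    have hfne : f ≠ [] := by
      rcases hfl with ⟨hf2, _⟩ | ⟨_, hfne, _⟩
      · intro h; rw [h] at hf2; simp at hf2
      · exact hfne
    have hlne : l ≠ [] := by
      rcases hfl with ⟨_, hl2⟩ | ⟨_, _, hlne⟩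
      · intro h; rw [h] at hl2; simp at hl2
      · exact hlne
    by_cases hop : op = "ShiftRow"
    · subst hop
      obtain ⟨hf2, hl2⟩ : 2 ≤ f.length ∧ 2 ≤ l.length := by
        rcases hfl with h | ⟨hno, _, _⟩
        · exact h
        · exact absurd rfl (hno _ List.mem_cons_self)
      rw [List.foldl_cons, List.foldl_cons]
      rw [show (some (f, l, lt, rt, m)).bind
            (fun s => pvStepA s.1 s.2.1 s.2.2.1 s.2.2.2.1 s.2.2.2.2 "ShiftRow")
          = pvStepA f l lt rt m "ShiftRow" from rfl]
      rw [pvStepA_shift f l lt rt m hf2]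
      rw [if_pos rfl, pvShiftB_abs]
      obtain ⟨f', l', lt', rt', m', hfold, h1, h2, habs⟩ :=
        ih l ((lt ++ [f.dropLast.headD 0]).headD 0 ::
            ((f.dropLast.tail :: m).getLastD [] ++ [(f.getLastD 0 :: rt).getLastD 0]))
          ((lt ++ [f.dropLast.headD 0]).tail) ((f.getLastD 0 :: rt).dropLast)
          ((f.dropLast.tail :: m).dropLast)
          (Or.inl ⟨hl2, by simp only [List.length_cons, List.length_append, List.length_nil]; omega⟩)
          (by simp [List.length_tail, hlt]) (by simp [hrt])
      refine ⟨f', l', lt', rt', m', hfold, h1, h2, ?_⟩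
      rw [habs]
      congr 1
      exact congrArg (List.cons l) (pvShift_abs f lt rt m hf2 hlt hrt)
    · rw [List.foldl_cons, List.foldl_cons]
      rw [show (some (f, l, lt, rt, m)).bind
            (fun s => pvStepA s.1 s.2.1 s.2.2.1 s.2.2.2.1 s.2.2.2.2 op)
          = pvStepA f l lt rt m op from rfl]
      rw [pvStepA_rot f l lt rt m op hop hfne hlne]
      rw [if_neg hop]
      have hfl' : (2 ≤ ((l.headD 0 :: lt).getLastD 0 :: f.dropLast).length ∧
            2 ≤ (l.tail ++ [(f.getLastD 0 :: rt).getLastD 0]).length) ∨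
          ((∀ op ∈ ops, ¬ op = "ShiftRow") ∧
            (l.headD 0 :: lt).getLastD 0 :: f.dropLast ≠ [] ∧
            l.tail ++ [(f.getLastD 0 :: rt).getLastD 0] ≠ []) := by
        rcases hfl with ⟨hf2, hl2⟩ | ⟨hno, _, _⟩
        · exact Or.inl ⟨by simp only [List.length_cons, List.length_dropLast]; omega,
            by simp only [List.length_append, List.length_tail, List.length_cons, List.length_nil]; omega⟩
        · exact Or.inr ⟨fun o ho => hno o (List.mem_cons_of_mem _ ho), by simp, by simp⟩
      obtain ⟨f', l', lt', rt', m', hfold, h1, h2, habs⟩ :=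
        ih ((l.headD 0 :: lt).getLastD 0 :: f.dropLast)
          (l.tail ++ [(f.getLastD 0 :: rt).getLastD 0])
          ((l.headD 0 :: lt).dropLast) ((f.getLastD 0 :: rt).dropLast) m
          hfl' (by simp [hlt]) (by simp [hrt])
      refine ⟨f', l', lt', rt', m', hfold, h1, h2, ?_⟩
      rw [habs]
      congr 1
      exact pvRot_abs f l lt rt m hfne hlne hlt hrt

-- the indexed comprehensions of A's initialisation read off the inner rows
theorem pvMapRange {α : Type} (d : α) (g : List Int → α) (f l : List Int) (inner : List (List Int)) :
    (PySem.List.pyRange 1 (PySem.List.len (f :: inner ++ [l]) - 1) 1).map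
        (fun r => g (PySem.List.pyGetD (f :: inner ++ [l]) r [])) = inner.map g := by
  have hlen : PySem.List.len (f :: inner ++ [l]) = ((inner.length : Int) + 2) := by
    simp [PySem.List.len_eq]
    omega
  rw [hlen]
  have hrlen : (PySem.List.pyRange 1 ((inner.length : Int) + 2 - 1) 1).length = inner.length := by
    rw [PySem.List.length_pyRange_one]
    omega
  apply pvExt d
  · rw [List.length_map, List.length_map, hrlen]
  · intro j hj
    rw [List.length_map, hrlen] at hj
    rw [pvGetD_map _ _ _ _ (0 : Int) (by rw [hrlen]; exact hj),
      pvGetD_map _ _ _ _ ([] : List Int) hj]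
    congr 1
    have hr : (PySem.List.pyRange 1 ((inner.length : Int) + 2 - 1) 1).getD j 0 = 1 + (j : Int) := by
      rw [List.getD_eq_getElem _ _ (by rw [hrlen]; exact hj), PySem.List.getElem_pyRange_one]
    rw [hr, show (1 : Int) + (j : Int) = (((j + 1 : Nat)) : Int) by push_cast; ring,
      PySem.List.pyGetD_natCast]
    rw [List.getD_append _ _ _ _ (by simp; omega), pvGetD_cons_succ]

theorem pvInitA_eq (C : Nat) (f l : List Int) (inner : List (List Int)) (hf : f.length = C) :
    pvInitA (f :: inner ++ [l]) =
      some (f, l,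
        (inner.map (fun r => PySem.List.pyGetD r 0 0)).reverse,
        inner.map (fun r => PySem.List.pyGetD r (-1) 0),
        inner.map (fun r => PySem.List.slice r (some 1) (some ((C : Int) - 1)))) := by
  have hget0 : PySem.List.pyGet? (f :: inner ++ [l]) 0 = some f := by
    rw [show (f :: inner ++ [l]) = f :: (inner ++ [l]) from rfl]
    exact PySem.List.pyGet?_zero_cons f (inner ++ [l])
  simp only [pvInitA, hget0]
  rw [pvPyGetD_end]
  have hC : PySem.List.len f = (C : Int) := by simp [PySem.List.len_eq, hf]
  rw [hC]
  have hstep : PySem.List.len (f :: inner ++ [l]) - 2 + 1 = PySem.List.len (f :: inner ++ [l]) - 1 := by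
    ring
  have hleft : PySem.List.pyRange (PySem.List.len (f :: inner ++ [l]) - 2) 0 (-1)
      = (PySem.List.pyRange 1 (PySem.List.len (f :: inner ++ [l]) - 1) 1).reverse := by
    rw [PySem.List.pyRange_neg_one_eq_reverse, show (0 : Int) + 1 = 1 by norm_num, hstep]
  rw [hleft, List.map_reverse,
    pvMapRange (0 : Int) (fun r => PySem.List.pyGetD r 0 0) f l inner,
    pvMapRange (0 : Int) (fun r => PySem.List.pyGetD r (-1) 0) f l inner,
    pvMapRange ([] : List Int) (fun r => PySem.List.slice r (some 1) (some ((C : Int) - 1))) f l inner]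

-- slicing a full row of width C
theorem pvSlice_row (C : Nat) (hC : 2 ≤ C) (r : List Int) (hr : r.length = C) :
    PySem.List.slice r (some 1) (some ((C : Int) - 1)) = r.tail.dropLast := by
  rw [show ((C : Int) - 1) = (((C - 1 : Nat)) : Int) by push_cast [Nat.cast_sub (by omega : 1 ≤ C)]; ring,
    show (1 : Int) = ((1 : Nat) : Int) from rfl, PySem.List.slice_natCast]
  rw [List.drop_one, List.dropLast_eq_take]
  congr 1
  simp [hr]

theorem pvGlue_row (C : Nat) (hC : 2 ≤ C) (r : List Int) (hr : r.length = C) :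
    pvGlue (PySem.List.pyGetD r 0 0) (PySem.List.slice r (some 1) (some ((C : Int) - 1)))
      (PySem.List.pyGetD r (-1) 0) = r := by
  have hrne : r ≠ [] := by intro h; rw [h] at hr; simp at hr; omega
  obtain ⟨a, t, rfl⟩ : ∃ a t, r = a :: t := by
    cases r with
    | nil => exact absurd rfl hrne
    | cons a b => exact ⟨a, b, rfl⟩
  have htne : t ≠ [] := by
    intro h; rw [h] at hr; simp at hr; omega
  have htlen : 0 < t.length := List.length_pos_of_ne_nil htne
  rw [pvSlice_row C hC _ hr, pvPyGetD_neg_one _ _ hrne, pvPyGetD_zero]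
  have h2 : (a :: t).getD ((a :: t).length - 1) 0 = t.getLast htne := by
    have heq : (a :: t).length - 1 = (t.length - 1) + 1 := by simp; omega
    rw [heq, pvGetD_cons_succ, List.getD_eq_getElem _ _ (by omega)]
    exact (List.getLast_eq_getElem htne).symm
  rw [h2, show (a :: t).getD 0 0 = a from rfl]
  show a :: (t.dropLast ++ [t.getLast htne]) = a :: t
  exact congrArg (List.cons a) (List.dropLast_concat_getLast htne)

theorem pvRows_init (C : Nat) (hC : 2 ≤ C) (inner : List (List Int))
    (hin : ∀ r ∈ inner, r.length = C) :
    pvRows ((inner.map (fun r => PySem.List.pyGetD r 0 0)).reverse)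
      (inner.map (fun r => PySem.List.slice r (some 1) (some ((C : Int) - 1))))
      (inner.map (fun r => PySem.List.pyGetD r (-1) 0)) = inner := by
  unfold pvRows
  rw [List.reverse_reverse]
  apply pvExt ([] : List Int)
  · simp
  · intro j hj
    simp only [List.length_map, List.length_zip, Nat.min_self, min_self] at hj
    have hj' : j < inner.length := by
      simpa using hj
    have hmem : inner.getD j [] ∈ inner := by
      rw [List.getD_eq_getElem _ _ hj']
      exact List.getElem_mem hj'
    rw [pvGetD_map _ _ _ _ ((0 : Int), (([] : List Int), (0 : Int)))
        (by simp; omega),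
      pvGetD_zip _ _ _ _ _ (by simpa using hj') (by simp; omega),
      pvGetD_zip _ _ _ _ _ (by simpa using hj') (by simpa using hj'),
      pvGetD_map _ _ _ _ _ hj', pvGetD_map _ _ _ _ ([] : List Int) hj',
      pvGetD_map _ _ _ _ ([] : List Int) hj']
    exact pvGlue_row C hC _ (hin _ hmem)

-- single-row board: the initial five deques
theorem pvSlice_singleton {α : Type} (x : α) :
    PySem.List.slice [x] (some 1) (some (-1)) = [] := by
  unfold PySem.List.slice
  norm_num [PySem.List.clampIdx_neg_one, PySem.List.clampIdx_natCast]

theorem pvInitA_single (r : List Int) :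
    pvInitA [r] = some (r, r, [], [], []) := by
  have hget0 : PySem.List.pyGet? ([r] : List (List Int)) 0 = some r :=
    PySem.List.pyGet?_zero_cons r []
  simp only [pvInitA, hget0]
  have h1 : PySem.List.pyGetD ([r] : List (List Int)) (-1) [] = r := by
    rw [pvPyGetD_neg_one _ _ (by simp)]
    rfl
  have h2 : PySem.List.len ([r] : List (List Int)) - 2 = (-1 : Int) := by
    simp [PySem.List.len_eq]
  have h3 : PySem.List.len ([r] : List (List Int)) - 1 = (0 : Int) := by
    simp [PySem.List.len_eq]
  rw [h1, h2, h3, PySem.List.pyRange_neg_one_eq_nil (by norm_num),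
    PySem.List.pyRange_one_eq_nil (by norm_num)]
  rfl

theorem pvShiftB_single (mat : List Int) : pvShiftB [mat] = [mat] := by
  unfold pvShiftB
  rw [PySem.List.slice_from_neg_one, PySem.List.slice_to_neg_one]
  rfl

-- one Rotate on a single-row board produces the two-row border rotation
theorem pvRot_single (r : List Int) (hrne : r ≠ []) :
    ((r.headD 0 :: ([] : List Int)).getLastD 0 :: r.dropLast)
      :: pvRows ((r.headD 0 :: ([] : List Int)).dropLast) [] ((r.getLastD 0 :: ([] : List Int)).dropLast)
      ++ [r.tail ++ [(r.getLastD 0 :: ([] : List Int)).getLastD 0]]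
    = pvRotateB [r] := by
  have hone : PySem.List.pyGetD ([r] : List (List Int)) (-1) [] = r := by
    rw [pvPyGetD_neg_one _ _ (by simp)]
    rfl
  have hzero : PySem.List.pyGetD ([r] : List (List Int)) 0 [] = r := by
    rw [pvPyGetD_zero]
    rfl
  simp only [pvRotateB]
  rw [hzero, hone, pvSlice_singleton]
  simp only [List.nil_append, PySem.List.slice_from_one, PySem.List.slice_to_neg_one,
    List.tail_cons, List.zip_nil_left, List.map_nil]
  rw [hzero, hone]
  rw [pvPyGetD_zero, pvPyGetD_neg_one _ _ hrne]
  rw [← pvHeadD_eq_getD, ← pvGetLastD_eq_getD _ _ hrne]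
  rfl

-- a prefix made of ShiftRow operations leaves a single-row board unchanged on both sides
theorem pvShiftsFix (r : List Int) (hr : 2 ≤ r.length) : ∀ (pre : List String),
    (∀ o ∈ pre, o = "ShiftRow") →
    pre.foldl (fun s? op => s?.bind (fun s => pvStepA s.1 s.2.1 s.2.2.1 s.2.2.2.1 s.2.2.2.2 op))
        (some (r, r, [], [], [])) = some (r, r, [], [], []) ∧
      pre.foldl (fun mat op => if op = "ShiftRow" then pvShiftB mat else pvRotateB mat) [r] = [r] := by
  intro pre
  induction pre with
  | nil => intro _; exact ⟨rfl, rfl⟩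
  | cons o pre ih =>
    intro h
    have ho : o = "ShiftRow" := h o List.mem_cons_self
    subst ho
    have hrne : r ≠ [] := by intro h'; rw [h'] at hr; simp at hr
    have hfix : pvStepA r r [] [] [] "ShiftRow" = some (r, r, [], [], []) := by
      rw [pvStepA_shift r r [] [] [] hr]
      have : (([] : List Int) ++ [r.dropLast.headD 0]).headD 0 ::
            ((r.dropLast.tail :: ([] : List (List Int))).getLastD [] ++
              [(r.getLastD 0 :: ([] : List Int)).getLastD 0]) = r := by
        show r.dropLast.headD 0 :: (r.dropLast.tail ++ [r.getLastD 0]) = r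
        exact pvGlue_eta r hr hrne
      rw [this]
      rfl
    constructor
    · rw [List.foldl_cons,
        show (some (r, r, ([] : List Int), ([] : List Int), ([] : List (List Int)))).bind
            (fun s => pvStepA s.1 s.2.1 s.2.2.1 s.2.2.2.1 s.2.2.2.2 "ShiftRow")
          = pvStepA r r [] [] [] "ShiftRow" from rfl, hfix]
      exact (ih (fun o ho => h o (List.mem_cons_of_mem _ ho))).1
    · rw [List.foldl_cons, if_pos rfl, pvShiftB_single]
      exact (ih (fun o ho => h o (List.mem_cons_of_mem _ ho))).2

-- split a list of operations at its first non-ShiftRow element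
theorem pvFirstRot (ops : List String) (hex : ∃ op ∈ ops, ¬ op = "ShiftRow") :
    ∃ pre op rest, ops = pre ++ op :: rest ∧ (∀ o ∈ pre, o = "ShiftRow") ∧ ¬ op = "ShiftRow" := by
  induction ops with
  | nil => obtain ⟨op, hmem, _⟩ := hex; simp at hmem
  | cons a t ih =>
    by_cases ha : a = "ShiftRow"
    · subst ha
      have hex' : ∃ op ∈ t, ¬ op = "ShiftRow" := by
        obtain ⟨op, hmem, hop⟩ := hex
        rcases List.mem_cons.mp hmem with rfl | hmem'
        · exact absurd rfl hop
        · exact ⟨op, hmem', hop⟩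
      obtain ⟨pre, op, rest, heq, hpre, hop⟩ := ih hex'
      exact ⟨"ShiftRow" :: pre, op, rest, by rw [heq]; rfl,
        fun o ho => by
          rcases List.mem_cons.mp ho with rfl | ho'
          · rfl
          · exact hpre o ho', hop⟩
    · exact ⟨[], a, t, rfl, by simp, ha⟩

-- ===== VERDICT (by name: the statement is the Claim_ definition above) =====
theorem solution_spec : Claim_equal_solution := by
  intro rc operations _hdom hpre
  unfold Spec_solution
  rcases hpre with ⟨hR, hCpre, hLpre, hrect, hCor, hOps⟩ | ⟨hR1, hC1, hex⟩
  · -- at least two rows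
    have hne : rc ≠ [] := by intro h; rw [h] at hR; simp at hR
    obtain ⟨f, inner, l, rfl⟩ : ∃ f inner l, rc = f :: inner ++ [l] := by
      obtain ⟨last, rest, hlr⟩ : ∃ last rest, rc = rest ++ [last] :=
        ⟨rc.getLast hne, rc.dropLast, (List.dropLast_concat_getLast hne).symm⟩
      cases rest with
      | nil => rw [hlr] at hR; simp at hR
      | cons a b => exact ⟨a, b, last, by rw [hlr]⟩
    have hhead : (f :: inner ++ [l]).headD [] = f := rfl
    have hlast : ((f :: inner ++ [l]) : List (List Int)).getLastD [] = l := by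
      rw [pvGetLastD_eq_getD _ _ (by simp)]
      rw [List.getD_append_right _ _ _ _ (by simp)]
      have h0 : ((f :: inner ++ [l]) : List (List Int)).length - 1 - (f :: inner).length = 0 := by
        simp
      rw [h0, pvGetD_zero_cons]
    have htd : (f :: inner ++ [l]).tail.dropLast = inner := by
      show (inner ++ [l]).dropLast = inner
      exact List.dropLast_concat
    rw [hhead] at hCpre hCor
    rw [hlast] at hLpre hOps
    rw [hhead] at hOps
    rw [htd, hhead] at hrect
    have hfl : (2 ≤ f.length ∧ 2 ≤ l.length) ∨
        ((∀ op ∈ operations, ¬ op = "ShiftRow") ∧ f ≠ [] ∧ l ≠ []) := by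
      rcases hOps with hno | ⟨h2, h2'⟩
      · exact Or.inr ⟨hno, by intro h; rw [h] at hCpre; simp at hCpre,
          by intro h; rw [h] at hLpre; simp at hLpre⟩
      · exact Or.inl ⟨h2, h2'⟩
    have hinit := pvInitA_eq f.length f l inner rfl
    obtain ⟨f', l', lt', rt', m', hfold, h1, h2, habs⟩ :=
      pvLoopA operations f l
        ((inner.map (fun r => PySem.List.pyGetD r 0 0)).reverse)
        (inner.map (fun r => PySem.List.pyGetD r (-1) 0))
        (inner.map (fun r => PySem.List.slice r (some 1) (some ((f.length : Int) - 1))))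
        hfl (by simp) (by simp)
    have hrows : pvRows ((inner.map (fun r => PySem.List.pyGetD r 0 0)).reverse)
        (inner.map (fun r => PySem.List.slice r (some 1) (some ((f.length : Int) - 1))))
        (inner.map (fun r => PySem.List.pyGetD r (-1) 0)) = inner := by
      rcases hCor with hC2 | hR2
      · exact pvRows_init f.length hC2 inner hrect
      · have hinner : inner = [] := by
          rw [← List.length_eq_zero_iff]
          simp only [List.length_append, List.length_cons, List.length_nil] at hR2
          omega
        subst hinner
        rfl
    unfold solution
    rw [hinit, hfold]
    show f' :: pvRebuildA lt' rt' m' ++ [l'] = solution_alt (f :: inner ++ [l]) operations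
    rw [pvRebuildA_eq m' lt' rt' h1 h2]
    rw [habs, hrows]
    rfl
  · -- a single row, at least one Rotate among the operations
    obtain ⟨r, rfl⟩ : ∃ r, rc = [r] := by
      cases rc with
      | nil => simp at hR1
      | cons a t =>
        cases t with
        | nil => exact ⟨a, rfl⟩
        | cons b t' => simp at hR1
    have hC2 : 2 ≤ r.length := hC1
    have hrne : r ≠ [] := by intro h; rw [h] at hC2; simp at hC2
    obtain ⟨pre, op, rest, rfl, hpre, hop⟩ := pvFirstRot operations hex
    unfold solution
    rw [pvInitA_single r, List.foldl_append, (pvShiftsFix r hC2 pre hpre).1, List.foldl_cons]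
    rw [show (some (r, r, ([] : List Int), ([] : List Int), ([] : List (List Int)))).bind
          (fun s => pvStepA s.1 s.2.1 s.2.2.1 s.2.2.2.1 s.2.2.2.2 op)
        = pvStepA r r [] [] [] op from rfl]
    rw [pvStepA_rot r r [] [] [] op hop hrne hrne]
    obtain ⟨f', l', lt', rt', m', hfold, h1, h2, habs⟩ :=
      pvLoopA rest ((r.headD 0 :: ([] : List Int)).getLastD 0 :: r.dropLast)
        (r.tail ++ [(r.getLastD 0 :: ([] : List Int)).getLastD 0])
        ((r.headD 0 :: ([] : List Int)).dropLast) ((r.getLastD 0 :: ([] : List Int)).dropLast) []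
        (Or.inl ⟨by simp only [List.length_cons, List.length_dropLast]; omega,
          by simp only [List.length_append, List.length_tail, List.length_cons, List.length_nil]; omega⟩)
        (by simp) (by simp)
    rw [hfold]
    show f' :: pvRebuildA lt' rt' m' ++ [l'] = solution_alt [r] (pre ++ op :: rest)
    rw [pvRebuildA_eq m' lt' rt' h1 h2, habs]
    show _ = (pre ++ op :: rest).foldl
        (fun mat op => if op = "ShiftRow" then pvShiftB mat else pvRotateB mat) [r]
    rw [List.foldl_append, (pvShiftsFix r hC2 pre hpre).2, List.foldl_cons, if_neg hop,
      ← pvRot_single r hrne]
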